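-- pv_equiv track=rewrite | github.com/IsaacG/Advent-of-Code | everybody_codes/event2024/quest_11.py | solve
-- ===== SOURCE A (Python) =====
-- def counter(conversions: dict[str, list[str]], start: str, steps: int) -> int:
--     """Return the number of termines after some steps."""
--     counts = {start: 1}
--     for _ in range(steps):
--         next_counts = {src: 0 for src in conversions}
--         for src, num in counts.items():
--             for dst in conversions[src]:
--                 next_counts[dst] += num
--         counts = next_counts
--     return sum(next_counts.values())
--
-- def solve(part: int, data: str) -> int:
--     """Solve the parts."""
--     conversions = {}
--     for line in data.splitlines():
--         src, dst = line.split(":")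
--         conversions[src] = dst.split(",")
--
--     if part == 1:
--         return counter(conversions, "A", 4)
--     if part == 2:
--         return counter(conversions, "Z", 10)
--
--     counts = [counter(conversions, start, 20) for start in conversions]
--     return max(counts) - min(counts)
-- ===== SOURCE B (Python) =====
-- def solve(part: int, data: str) -> int:
--     """Solve the parts."""
--     conversions = {}
--     for line in data.splitlines():
--         src, dst = line.split(":")
--         conversions[src] = dst.split(",")
--
--     memo = {}
--
--     def f(src: str, remaining: int) -> int:
--         neighbors = conversions[src]
--         if remaining == 0:
--             return 1
--         key = (src, remaining)
--         if key not in memo: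
--             memo[key] = sum(f(dst, remaining - 1) for dst in neighbors)
--         return memo[key]
--
--     if part == 1:
--         return f("A", 4)
--     if part == 2:
--         return f("Z", 10)
--
--     counts = [f(start, 20) for start in conversions]
--     return max(counts) - min(counts)
-- ===== Notes on version B (the rewrite author's own statement) =====
-- stated objective: alternative
-- what changed: A propagates a full per-species count dict forward step by step; B computes the count of a single start species by a memoized recursion on the remaining steps (count(src, r) = 1 if r = 0 else sum of count(dst, r-1)), sharing the memo across all starts in part 3.
import Mathlib
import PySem

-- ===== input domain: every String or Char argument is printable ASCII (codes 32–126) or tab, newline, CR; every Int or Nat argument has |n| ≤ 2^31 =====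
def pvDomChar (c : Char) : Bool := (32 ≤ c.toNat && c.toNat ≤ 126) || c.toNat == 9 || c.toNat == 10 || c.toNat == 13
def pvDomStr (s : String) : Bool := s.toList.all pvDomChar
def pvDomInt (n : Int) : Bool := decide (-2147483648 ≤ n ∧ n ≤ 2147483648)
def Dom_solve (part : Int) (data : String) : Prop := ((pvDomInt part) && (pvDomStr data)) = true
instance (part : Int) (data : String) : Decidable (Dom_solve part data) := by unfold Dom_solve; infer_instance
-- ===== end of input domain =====

-- B replaces A's layer-by-layer dict propagation by a memoized recursion on the remaining
-- step count (count from one source = sum of counts of its destinations one step later).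

-- Shared parsing (both Pythons carry the identical parsing loop):
-- 'src, dst = line.split(":")' ; 'conversions[src] = dst.split(",")'
-- list defaults are used where Python would raise ValueError (≠ 2 parts); Pre_ excludes those.
def lineParts (line : String) : List String := (PySem.Str.split? line ":").getD []

def parseConv (data : String) : PySem.Dict String (List String) :=
  (PySem.Str.splitlines data).foldl
    (fun conv line =>
      conv.insert ((lineParts line).getD 0 "")
        ((PySem.Str.split? ((lineParts line).getD 1 "") ",").getD []))
    PySem.Dict.empty

-- ===== PORT A =====
-- counter: 'next_counts = {src: 0 for src in conversions}'
def zeroCounts (conv : PySem.Dict String (List String)) : PySem.Dict String Int :=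
  conv.keys.foldl (fun d s => d.insert s 0) PySem.Dict.empty

-- one iteration of A's propagation loop; 'next_counts[dst] += num' is modify with
-- default 0 (Python raises KeyError when dst is absent; Pre_ excludes exactly those inputs)
def stepCounts (conv : PySem.Dict String (List String)) (counts : PySem.Dict String Int) :
    PySem.Dict String Int :=
  counts.items.foldl
    (fun next p => (conv.getD p.1 []).foldl (fun next dst => next.modify dst 0 (· + p.2)) next)
    (zeroCounts conv)

-- Python returns sum(next_counts.values()); at every call site steps ∈ {4,10,20} ≥ 1,
-- so next_counts is the final value of counts.
def counter (conv : PySem.Dict String (List String)) (start : String) (steps : Nat) : Int :=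
  let counts := (List.range steps).foldl (fun counts _ => stepCounts conv counts)
    (PySem.Dict.empty.insert start 1)
  counts.values.sum

def solve (part : Int) (data : String) : Int :=
  let conversions := parseConv data
  if part = 1 then counter conversions "A" 4
  else if part = 2 then counter conversions "Z" 10
  else
    let counts := conversions.keys.map (fun start => counter conversions start 20)
    -- max(counts) - min(counts); Pre_ guarantees nonempty, default 0 is never read
    (PySem.List.max? counts (fun x => x)).getD 0 - (PySem.List.min? counts (fun x => x)).getD 0

-- ===== PORT B =====
-- f(src, remaining): neighbors is looked up before the base case (as in Source B, which
-- preserves A's KeyError on a reached non-key species; under Pre_ the default [] is never read).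
-- Source B memoizes this recursion; the memo is a pure cache, so the port is the plain recursion.
def termites (conv : PySem.Dict String (List String)) (src : String) (remaining : Nat) : Int :=
  let neighbors := conv.getD src []
  match remaining with
  | 0 => 1
  | k + 1 => (neighbors.map (fun dst => termites conv dst k)).sum
termination_by remaining

def solve_alt (part : Int) (data : String) : Int :=
  let conversions := parseConv data
  if part = 1 then termites conversions "A" 4
  else if part = 2 then termites conversions "Z" 10
  else
    let counts := conversions.keys.map (fun start => termites conversions start 20)
    (PySem.List.max? counts (fun x => x)).getD 0 - (PySem.List.min? counts (fun x => x)).getD 0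

-- ===== PRECONDITION & SPEC =====
-- Exactly the inputs on which Python A returns: every line splits on ":" into exactly two
-- parts (else ValueError), every destination species is a key of the final dict and the
-- start key exists / the dict is nonempty (else KeyError in counter resp. ValueError in max()).
def Pre_solve (part : Int) (data : String) : Prop :=
  (∀ l ∈ PySem.Str.splitlines data, ((PySem.Str.split? l ":").getD []).length = 2) ∧
  (∀ ds ∈ (parseConv data).values, ∀ d ∈ ds, d ∈ (parseConv data).keys) ∧
  (if part = 1 then "A" ∈ (parseConv data).keys
   else if part = 2 then "Z" ∈ (parseConv data).keys
   else (parseConv data).keys ≠ [])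

instance (part : Int) (data : String) : Decidable (Pre_solve part data) := by
  unfold Pre_solve; infer_instance

def pvWitness_solve : Int × String := (1, "A:A")

def Spec_solve (part : Int) (data : String) (out : Int) : Prop := out = solve_alt part data
instance (part : Int) (data : String) (out : Int) : Decidable (Spec_solve part data out) := by
  unfold Spec_solve; infer_instance

-- ===== CLAIM (what is proved, stated in full; the proofs are below) =====
def Claim_equal_solve : Prop := ∀ (part : Int) (data : String), Dom_solve part data →
  Pre_solve part data → Spec_solve part data (solve part data)

-- ===== LEMMAS AND PROOFS =====

-- weighted sum of a counts dict: Σ num · w(src)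
def sumW (d : PySem.Dict String Int) (w : String → Int) : Int :=
  (d.items.map (fun p => p.2 * w p.1)).sum

-- the closure condition extracted from Pre_: every destination list reachable through getD
-- consists of keys (for a non-key src the default [] makes it vacuous)
def Closed (conv : PySem.Dict String (List String)) : Prop :=
  ∀ s : String, ∀ x ∈ conv.getD s [], x ∈ conv.keys

lemma closed_of_values (conv : PySem.Dict String (List String))
    (h : ∀ ds ∈ conv.values, ∀ d ∈ ds, d ∈ conv.keys) : Closed conv := by
  intro s x hx
  by_cases hcont : conv.contains s
  · have hs : (conv.get? s).isSome := by rw [← PySem.Dict.contains_eq_isSome_get?]; exact hcont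
    obtain ⟨v, hv⟩ := Option.isSome_iff_exists.mp hs
    have hg := PySem.Dict.getD_of_get?_eq_some (d := conv) (d0 := []) hv
    have hmem := PySem.Dict.mem_items_of_get?_eq_some (d := conv) hv
    have hval : v ∈ conv.values := by
      simp only [PySem.Dict.values, List.mem_map]; exact ⟨_, hmem, rfl⟩
    exact h v hval x (hg ▸ hx)
  · rw [PySem.Dict.getD_of_not_contains conv _ (by simpa using hcont)] at hx
    exact absurd hx (List.not_mem_nil)

lemma sum_map_update {l : List String} (hl : l.Nodup) {dst : String} (hdst : dst ∈ l)
    (f : String → Int) (c : Int) :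
    (l.map (fun k => if k = dst then f k + c else f k)).sum = (l.map f).sum + c := by
  induction l with
  | nil => simp at hdst
  | cons x t ih =>
    by_cases hx : x = dst
    · subst hx
      have hnot : x ∉ t := (List.nodup_cons.mp hl).1
      have he : t.map (fun k => if k = x then f k + c else f k) = t.map f :=
        List.map_congr_left (fun k hk => by
          have : k ≠ x := fun e => hnot (e ▸ hk)
          simp [this])
      rw [List.map_cons, List.sum_cons, he, if_pos rfl]
      simp only [List.map_cons, List.sum_cons]
      ring
    · have h : dst ∈ t := by
        rcases List.mem_cons.mp hdst with h | h
        · exact absurd h.symm hx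
        · exact h
      simp only [List.map_cons, List.sum_cons, if_neg hx,
        ih (List.nodup_cons.mp hl).2 h]
      ring

lemma keys_modify_mem (d : PySem.Dict String Int) {dst : String} (h : dst ∈ d.keys)
    (f : Int → Int) : (d.modify dst 0 f).keys = d.keys := by
  rw [PySem.Dict.keys_modify, PySem.Dict.keys_insert_of_contains]
  exact (PySem.Dict.contains_iff_mem_keys d dst).mpr h

-- one '+= num' at an existing key adds num · w(dst) to the weighted sum
lemma sumW_modify (d : PySem.Dict String Int) (hnd : d.keys.Nodup) {dst : String}
    (hdst : dst ∈ d.keys) (n : Int) (w : String → Int) :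
    ((d.modify dst 0 (· + n)).items.map (fun p => p.2 * w p.1)).sum
      = (d.items.map (fun p => p.2 * w p.1)).sum + n * w dst := by
  have hk : (d.modify dst 0 (· + n)).keys = d.keys := keys_modify_mem d hdst _
  have hnd' : (d.modify dst 0 (· + n)).keys.Nodup := hk ▸ hnd
  rw [PySem.Dict.items_eq_map_keys _ hnd' 0, PySem.Dict.items_eq_map_keys _ hnd 0, hk]
  rw [List.map_map, List.map_map]
  have : (fun k => (fun (p : String × Int) => p.2 * w p.1) ((fun k => (k, (d.modify dst 0 (· + n)).getD k 0)) k))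
      = fun k => if k = dst then (fun k => d.getD k 0 * w k) k + n * w dst else (fun k => d.getD k 0 * w k) k := by
    funext k
    simp only [PySem.Dict.getD_modify]
    by_cases hkd : k = dst
    · subst hkd; simp; ring
    · simp [hkd]
  rw [show ((fun (p : String × Int) => p.2 * w p.1) ∘ fun k => (k, (d.modify dst 0 (· + n)).getD k 0))
      = fun k => if k = dst then (fun k => d.getD k 0 * w k) k + n * w dst else (fun k => d.getD k 0 * w k) k from this]
  rw [sum_map_update hnd hdst (fun k => d.getD k 0 * w k) (n * w dst)]
  rfl

-- A's inner loop over one destination list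
lemma sumW_foldl_modify (dsts : List String) (d : PySem.Dict String Int)
    (hnd : d.keys.Nodup) (hsub : ∀ x ∈ dsts, x ∈ d.keys) (n : Int) (w : String → Int) :
    (dsts.foldl (fun next dst => next.modify dst 0 (· + n)) d).keys = d.keys ∧
    sumW (dsts.foldl (fun next dst => next.modify dst 0 (· + n)) d) w
      = sumW d w + n * (dsts.map w).sum := by
  induction dsts generalizing d with
  | nil => simp [sumW]
  | cons x t ih =>
    have hx : x ∈ d.keys := hsub x (List.mem_cons_self)
    have hk : (d.modify x 0 (· + n)).keys = d.keys := keys_modify_mem d hx _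
    have hnd' : (d.modify x 0 (· + n)).keys.Nodup := hk ▸ hnd
    have hsub' : ∀ y ∈ t, y ∈ (d.modify x 0 (· + n)).keys := by
      intro y hy; rw [hk]; exact hsub y (List.mem_cons_of_mem _ hy)
    obtain ⟨ihk, ihs⟩ := ih (d.modify x 0 (· + n)) hnd' hsub'
    refine ⟨by rw [List.foldl_cons, ihk, hk], ?_⟩
    rw [List.foldl_cons, ihs]
    show ((d.modify x 0 (· + n)).items.map (fun p => p.2 * w p.1)).sum + _ = _
    rw [sumW_modify d hnd hx n w]
    simp only [List.map_cons, List.sum_cons, sumW]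
    ring

lemma foldl_range_iterate {α : Type} (g : α → α) (n : Nat) (x : α) :
    (List.range n).foldl (fun a _ => g a) x = g^[n] x := by
  induction n with
  | zero => simp
  | succ m ih => rw [List.range_succ, List.foldl_append, ih, Function.iterate_succ_apply']; rfl

lemma zeroCounts_items (conv : PySem.Dict String (List String)) (hnd : conv.keys.Nodup) :
    (zeroCounts conv).items = conv.keys.map (fun k => (k, (0:Int))) := by
  unfold zeroCounts
  rw [PySem.Dict.items_foldl_insert_fresh conv.keys (fun a => a) (fun _ => (0:Int))
      PySem.Dict.empty (fun a _ => PySem.Dict.contains_empty a) (by simpa using hnd)]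
  simp [PySem.Dict.empty]

lemma zeroCounts_keys (conv : PySem.Dict String (List String)) (hnd : conv.keys.Nodup) :
    (zeroCounts conv).keys = conv.keys := by
  simp only [PySem.Dict.keys, zeroCounts_items conv hnd, List.map_map]
  simp

lemma sumW_zeroCounts (conv : PySem.Dict String (List String)) (hnd : conv.keys.Nodup)
    (w : String → Int) : sumW (zeroCounts conv) w = 0 := by
  unfold sumW
  rw [zeroCounts_items conv hnd, List.map_map]
  have : ((fun (p : String × Int) => p.2 * w p.1) ∘ fun k => (k, (0:Int))) = fun k => (0:Int) := by
    funext k; simp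
  rw [this]
  simp

-- A's outer loop over counts.items
lemma sumW_items_fold (conv : PySem.Dict String (List String)) (hnd : conv.keys.Nodup)
    (hc : Closed conv) (w : String → Int) (ps : List (String × Int))
    (d : PySem.Dict String Int) (hk : d.keys = conv.keys) :
    (ps.foldl (fun next p => (conv.getD p.1 []).foldl
        (fun next dst => next.modify dst 0 (· + p.2)) next) d).keys = conv.keys ∧
    sumW (ps.foldl (fun next p => (conv.getD p.1 []).foldl
        (fun next dst => next.modify dst 0 (· + p.2)) next) d) w
      = sumW d w + (ps.map (fun p => p.2 * ((conv.getD p.1 []).map w).sum)).sum := by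
  induction ps generalizing d with
  | nil => exact ⟨hk, by simp⟩
  | cons p t ih =>
    have hnd' : d.keys.Nodup := hk ▸ hnd
    have hsub : ∀ x ∈ conv.getD p.1 [], x ∈ d.keys := by
      intro x hx; rw [hk]; exact hc p.1 x hx
    obtain ⟨fk, fs⟩ := sumW_foldl_modify (conv.getD p.1 []) d hnd' hsub p.2 w
    obtain ⟨ik, is⟩ := ih _ (fk.trans hk)
    refine ⟨by rw [List.foldl_cons]; exact ik, ?_⟩
    rw [List.foldl_cons, is, fs]
    simp only [List.map_cons, List.sum_cons]
    ring

-- one propagation step lowers the weight index: Σ n·f(s,k) over the new dict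
-- equals Σ n·f(s,k+1) over the old one (B's recurrence, read backwards)
lemma sumW_step (conv : PySem.Dict String (List String)) (hnd : conv.keys.Nodup)
    (hc : Closed conv) (counts : PySem.Dict String Int) (k : Nat) :
    (stepCounts conv counts).keys = conv.keys ∧
    sumW (stepCounts conv counts) (fun s => termites conv s k)
      = sumW counts (fun s => termites conv s (k + 1)) := by
  obtain ⟨hk, hs⟩ := sumW_items_fold conv hnd hc (fun s => termites conv s k)
    counts.items (zeroCounts conv) (zeroCounts_keys conv hnd)
  refine ⟨hk, ?_⟩
  unfold stepCounts
  rw [hs, sumW_zeroCounts conv hnd, zero_add]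
  unfold sumW
  congr 1
  apply List.map_congr_left
  intro p _
  have : (fun s => termites conv s (k + 1)) p.1
      = ((conv.getD p.1 []).map (fun dst => termites conv dst k)).sum := by
    show termites conv p.1 (k + 1) = _
    rw [termites]
  rw [this]

lemma sumW_iterate (conv : PySem.Dict String (List String)) (hnd : conv.keys.Nodup)
    (hc : Closed conv) (m k : Nat) (counts : PySem.Dict String Int) :
    sumW ((stepCounts conv)^[m] counts) (fun s => termites conv s k)
      = sumW counts (fun s => termites conv s (k + m)) := by
  induction m generalizing counts k with
  | zero => simp
  | succ i ih =>
    rw [Function.iterate_succ_apply, ih k (stepCounts conv counts),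
      (sumW_step conv hnd hc counts (k + i)).2]
    have : k + i + 1 = k + (i + 1) := by omega
    rw [this]

lemma counter_eq_termites (conv : PySem.Dict String (List String)) (hnd : conv.keys.Nodup)
    (hc : Closed conv) (start : String) (steps : Nat) :
    counter conv start steps = termites conv start steps := by
  unfold counter
  rw [foldl_range_iterate]
  have hv : ∀ d : PySem.Dict String Int, d.values.sum = sumW d (fun s => termites conv s 0) := by
    intro d
    unfold sumW
    simp only [PySem.Dict.values]
    congr 1
    apply List.map_congr_left
    intro p _
    rw [termites]
    simp
  rw [hv, sumW_iterate conv hnd hc steps 0 _, zero_add]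
  unfold sumW
  rw [PySem.Dict.items_insert_of_not_contains _ _ (PySem.Dict.contains_empty start)]
  simp [PySem.Dict.empty]

lemma parseConv_nodup (data : String) : (parseConv data).keys.Nodup := by
  unfold parseConv
  exact PySem.Dict.nodup_keys_foldl_insert_key (PySem.Str.splitlines data)
    (fun line => (lineParts line).getD 0 "")
    (fun _ line => (PySem.Str.split? ((lineParts line).getD 1 "") ",").getD [])
    PySem.Dict.empty PySem.Dict.nodup_keys_empty

-- ===== VERDICT (by name: the statement is the Claim_ definition above) =====
theorem solve_spec : Claim_equal_solve := by
  intro part data _hdom hpre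
  obtain ⟨-, hvals, -⟩ := hpre
  have hnd := parseConv_nodup data
  have hc := closed_of_values _ hvals
  show solve part data = solve_alt part data
  unfold solve solve_alt
  split_ifs with h1 h2
  · exact counter_eq_termites _ hnd hc _ _
  · exact counter_eq_termites _ hnd hc _ _
  · have : (parseConv data).keys.map (fun start => counter (parseConv data) start 20)
        = (parseConv data).keys.map (fun start => termites (parseConv data) start 20) :=
      List.map_congr_left (fun s _ => counter_eq_termites _ hnd hc s 20)
    simp only [this]
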